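-- pv_equiv track=rewrite | github.com/shvalade/python_exercises | general.py | interval_year_leap
-- ===== SOURCE A (Python) =====
-- def is_year_leap(year):
--     if not (year % 400):
--         return True
--     if (not (year % 4)) and year % 100:
--         return True
--     return False
--
-- def interval_year_leap(start, end, list_year):
--     if is_year_leap(start):
--         pass
--     else:
--         start += 4 - start % 4
--     res = []
--     while start <= end:
--         if is_year_leap(start) and start not in list_year:
--             res.append(start)
--         start += 4
--     return res
-- ===== SOURCE B (Python) =====
-- def is_year_leap(year):
--     if not (year % 400):
--         return True
--     if (not (year % 4)) and year % 100:
--         return True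
--     return False
--
-- def interval_year_leap(start, end, list_year):
--     return [y for y in range(start, end + 1)
--             if is_year_leap(y) and y not in list_year]
-- ===== Notes on version B (the rewrite author's own statement) =====
-- stated objective: simpler
-- what changed: Replaced A's start-alignment arithmetic and stride-4 while loop with a single unit-stride comprehension over range(start, end+1) filtering on is_year_leap and membership; correct because every leap year is a multiple of 4, so the years A's alignment and stride skip can never be appended.
import Mathlib
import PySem

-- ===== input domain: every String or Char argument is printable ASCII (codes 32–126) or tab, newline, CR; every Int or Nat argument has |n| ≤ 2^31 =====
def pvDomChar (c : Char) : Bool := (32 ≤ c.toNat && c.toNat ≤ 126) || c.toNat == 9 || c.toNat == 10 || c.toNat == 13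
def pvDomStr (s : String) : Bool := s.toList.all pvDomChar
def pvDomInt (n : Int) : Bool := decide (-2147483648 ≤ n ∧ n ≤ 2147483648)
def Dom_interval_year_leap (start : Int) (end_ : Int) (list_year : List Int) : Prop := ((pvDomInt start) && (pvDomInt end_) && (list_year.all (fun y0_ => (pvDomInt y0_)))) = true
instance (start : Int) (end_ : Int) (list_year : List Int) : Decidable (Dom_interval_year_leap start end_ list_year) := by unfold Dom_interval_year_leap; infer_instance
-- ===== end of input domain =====

-- B replaces A's start-alignment arithmetic and stride-4 while loop with a plain
-- unit-stride filtered scan of [start, end]; objective: simpler.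

-- ===== PORT A =====
-- shared helper: a literal port of is_year_leap (used verbatim by both Pythons)
def is_year_leap (year : Int) : Bool :=
  if PySem.Int.mod year 400 == 0 then true
  else if PySem.Int.mod year 4 == 0 && !(PySem.Int.mod year 100 == 0) then true
  else false

-- the while loop of A: state = (start, res), stride 4
def iylLoop (list_year : List Int) (end_ : Int) (s : Int) (res : List Int) : List Int :=
  if _h : s ≤ end_ then
    iylLoop list_year end_ (s + 4)
      (if is_year_leap s && !list_year.contains s then res ++ [s] else res)
  else res
termination_by (end_ + 1 - s).toNat
decreasing_by omega

def interval_year_leap (start : Int) (end_ : Int) (list_year : List Int) : List Int :=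
  let start' := if is_year_leap start then start else start + (4 - PySem.Int.mod start 4)
  iylLoop list_year end_ start' []

-- ===== PORT B =====
def interval_year_leap_alt (start : Int) (end_ : Int) (list_year : List Int) : List Int :=
  (PySem.List.pyRange start (end_ + 1) 1).filter
    (fun y => is_year_leap y && !list_year.contains y)

-- ===== PRECONDITION & SPEC =====
def Spec_interval_year_leap (start : Int) (end_ : Int) (list_year : List Int) (out : List Int) : Prop := out = interval_year_leap_alt start end_ list_year
instance (start : Int) (end_ : Int) (list_year : List Int) (out : List Int) : Decidable (Spec_interval_year_leap start end_ list_year out) := by unfold Spec_interval_year_leap; infer_instance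

-- ===== CLAIM (what is proved, stated in full; the proofs are below) =====
def Claim_equal_interval_year_leap : Prop := ∀ (start : Int) (end_ : Int) (list_year : List Int), Dom_interval_year_leap start end_ list_year → Spec_interval_year_leap start end_ list_year (interval_year_leap start end_ list_year)

-- ===== LEMMAS AND PROOFS =====

-- every leap year is a multiple of 4
theorem leap_dvd_four (y : Int) (h : is_year_leap y = true) : (4 : Int) ∣ y := by
  unfold is_year_leap at h
  simp at h
  rcases h with h | h
  · exact dvd_trans (by norm_num) h
  · exact h.1

theorem leap_false_of_not_dvd (y : Int) (h : ¬ (4 : Int) ∣ y) : is_year_leap y = false := by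
  by_cases hl : is_year_leap y = true
  · exact absurd (leap_dvd_four y hl) h
  · simpa using hl

-- dropping one head element on which the predicate is false does not change the filter
theorem filter_skip (P : Int → Bool) (y b : Int) (h : P y = false) :
    List.filter P (PySem.List.pyRange y b 1) = List.filter P (PySem.List.pyRange (y + 1) b 1) := by
  by_cases hlt : y < b
  · rw [PySem.List.pyRange_one_cons hlt]
    simp [List.filter, h]
  · rw [PySem.List.pyRange_one_eq_nil (by omega), PySem.List.pyRange_one_eq_nil (by omega)]

-- dropping an initial segment on which the predicate is everywhere false
theorem filter_skip_to (P : Int → Bool) (b : Int) :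
    ∀ (n : Nat) (s t : Int), (t - s).toNat = n → s ≤ t →
    (∀ y, s ≤ y → y < t → P y = false) →
    List.filter P (PySem.List.pyRange s b 1) = List.filter P (PySem.List.pyRange t b 1) := by
  intro n
  induction n with
  | zero =>
    intro s t hn hst _
    have hst' : s = t := by omega
    subst hst'
    rfl
  | succ k ih =>
    intro s t hn hst hall
    have hslt : s < t := by omega
    rw [filter_skip P s b (hall s le_rfl hslt)]
    exact ih (s + 1) t (by omega) (by omega) (fun y hy1 hy2 => hall y (by omega) hy2)

-- the stride-4 loop from a multiple of 4 equals the unit-stride filter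
theorem loop_eq (ly : List Int) (e : Int) :
    ∀ (n : Nat) (s : Int) (res : List Int), (e + 1 - s).toNat = n → (4 : Int) ∣ s →
    iylLoop ly e s res =
      res ++ List.filter (fun y => is_year_leap y && !ly.contains y) (PySem.List.pyRange s (e + 1) 1) := by
  intro n
  induction n using Nat.strong_induction_on with
  | _ n ih =>
    intro s res hn hdvd
    by_cases hse : s ≤ e
    · rw [iylLoop, dif_pos hse]
      have hrec := ih ((e + 1 - (s + 4)).toNat) (by omega) (s + 4)
        (if is_year_leap s && !ly.contains s then res ++ [s] else res) rfl
        (by omega)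
      rw [hrec]
      rw [PySem.List.pyRange_one_cons (by omega : s < e + 1)]
      have hskip : List.filter (fun y => is_year_leap y && !ly.contains y)
            (PySem.List.pyRange (s + 1) (e + 1) 1)
          = List.filter (fun y => is_year_leap y && !ly.contains y)
            (PySem.List.pyRange (s + 4) (e + 1) 1) := by
        apply filter_skip_to _ _ 3 (s + 1) (s + 4) (by omega) (by omega)
        intro y hy1 hy2
        have : ¬ (4 : Int) ∣ y := by omega
        simp [leap_false_of_not_dvd y this]
      rw [List.filter_cons, hskip]
      by_cases hP : (is_year_leap s && !ly.contains s) = true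
      · rw [if_pos hP, if_pos hP]
        simp
      · rw [if_neg hP, if_neg hP]
    · rw [iylLoop, dif_neg hse, PySem.List.pyRange_one_eq_nil (by omega)]
      simp
theorem total_equiv (start e : Int) (ly : List Int) :
    interval_year_leap start e ly = interval_year_leap_alt start e ly := by
  unfold interval_year_leap interval_year_leap_alt
  by_cases hleap : is_year_leap start = true
  · simp only [hleap, if_pos]
    simpa using loop_eq ly e _ start [] rfl (leap_dvd_four start hleap)
  · simp only [hleap, if_neg, Bool.not_eq_true]
    have h4 : (0:Int) < 4 := by norm_num
    have hmb₁ : 0 ≤ PySem.Int.mod start 4 := PySem.Int.mod_nonneg start h4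
    have hmb₂ : PySem.Int.mod start 4 < 4 := PySem.Int.mod_lt start h4
    have hfm : PySem.Int.floordiv start 4 * 4 + PySem.Int.mod start 4 = start :=
      PySem.Int.floordiv_mul_add_mod start 4
    set s0 := start + (4 - PySem.Int.mod start 4) with hs0
    have hdvd : (4 : Int) ∣ s0 := by
      refine ⟨PySem.Int.floordiv start 4 + 1, ?_⟩
      omega
    rw [loop_eq ly e _ s0 [] rfl hdvd]
    simp only [List.nil_append]
    symm
    apply filter_skip_to _ _ (4 - PySem.Int.mod start 4).toNat start s0 (by omega) (by omega)
    intro y hy1 hy2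
    by_cases hys : y = start
    · subst hys
      simp only [Bool.not_eq_true] at hleap
      simp [hleap]
    · have hnd : ¬ (4 : Int) ∣ y := by
        rintro ⟨c, hc⟩
        omega
      simp [leap_false_of_not_dvd y hnd]

-- ===== VERDICT (by name: the statement is the Claim_ definition above) =====
theorem interval_year_leap_spec : Claim_equal_interval_year_leap := by
  intro start e ly _
  unfold Spec_interval_year_leap
  exact total_equiv start e ly
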